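-- pv_equiv track=rewrite | github.com/neuroethology/MARS_Developer | behavior_classification/MARS_annotation_parsers.py | rast_to_bouts
-- ===== SOURCE A (Python) =====
-- def rast_to_bouts(oneHot, names): # a helper for the bento save format
--     bouts = dict.fromkeys(names, None)
--     for val,name in enumerate(names):
--         bouts[name] = {'start': [], 'stop': []}
--         rast = [annot == val+1 for annot in oneHot]
--         rast = [False] + rast + [False]
--         start = [i+1 for i,(a,b) in enumerate(zip(rast[1:],rast[:-1])) if (a and not b)]
--         stop  = [i for i,(a,b) in enumerate(zip(rast[:-1],rast[1:])) if (a and not b)]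
--         bouts[name]['start'] = start
--         bouts[name]['stop'] = stop
--     return bouts
-- ===== SOURCE B (Python) =====
-- def rast_to_bouts(oneHot, names):  # single pass over oneHot, dispatching run edges per label
--     n = len(names)
--     starts = [[] for _ in names]
--     stops = [[] for _ in names]
--     prev = 0
--     for i, v in enumerate(oneHot):
--         if v != prev:
--             if 1 <= prev <= n:
--                 stops[prev - 1].append(i)
--             if 1 <= v <= n:
--                 starts[v - 1].append(i + 1)
--             prev = v
--     if 1 <= prev <= n:
--         stops[prev - 1].append(len(oneHot))
--     return {name: {'start': starts[val], 'stop': stops[val]} for val, name in enumerate(names)}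
-- ===== Notes on version B (the rewrite author's own statement) =====
-- stated objective: faster
-- what changed: Replaces A's per-name rescan of oneHot (a boolean raster plus two zipped edge-detection comprehensions for every name) with a single pass over oneHot that dispatches each run edge to its label's start/stop list.
import Mathlib
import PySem

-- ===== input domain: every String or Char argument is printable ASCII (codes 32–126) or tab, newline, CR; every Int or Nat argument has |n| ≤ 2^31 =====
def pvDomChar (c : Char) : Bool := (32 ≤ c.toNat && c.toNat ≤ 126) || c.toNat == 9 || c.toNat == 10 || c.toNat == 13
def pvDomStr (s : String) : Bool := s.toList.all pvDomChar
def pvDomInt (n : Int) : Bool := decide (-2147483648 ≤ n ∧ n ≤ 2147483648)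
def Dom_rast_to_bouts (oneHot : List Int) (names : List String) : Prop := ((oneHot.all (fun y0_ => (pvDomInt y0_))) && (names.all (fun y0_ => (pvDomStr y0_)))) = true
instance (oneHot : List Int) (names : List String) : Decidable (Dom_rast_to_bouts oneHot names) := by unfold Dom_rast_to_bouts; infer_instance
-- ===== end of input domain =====

-- B replaces A's per-name rescan of oneHot (one boolean raster and two zip scans per name) by a
-- single pass over oneHot that dispatches each run edge to its label's start/stop list (objective: faster).

-- ===== PORT A =====
-- dict.fromkeys(names, None): the None placeholder is represented by the empty inner dict —
-- exact, because the loop reassigns bouts[name] for every key before it is ever read.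
def rast_to_bouts (oneHot : List Int) (names : List String) :
    List (String × List (String × List Int)) :=
  let bouts : PySem.Dict String (PySem.Dict String (List Int)) :=
    names.foldl (fun d name => d.insert name PySem.Dict.empty) PySem.Dict.empty
  let bouts := (PySem.List.enumerate names).foldl
    (fun bouts vn =>
      let val := vn.1
      let name := vn.2
      let bouts := bouts.insert name
        (PySem.Dict.ofList [("start", ([] : List Int)), ("stop", ([] : List Int))])
      let rast : List Bool := oneHot.map (fun annot => annot == val + 1)
      let rast := [false] ++ rast ++ [false]
      let start := (PySem.List.enumerate ((PySem.List.slice rast (some 1) none).zip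
          (PySem.List.slice rast none (some (-1))))).filterMap
        (fun p => if p.2.1 && !p.2.2 then some (p.1 + 1) else none)
      let stop := (PySem.List.enumerate ((PySem.List.slice rast none (some (-1))).zip
          (PySem.List.slice rast (some 1) none))).filterMap
        (fun p => if p.2.1 && !p.2.2 then some p.1 else none)
      let bouts := bouts.modify name PySem.Dict.empty (fun inner => inner.insert "start" start)
      let bouts := bouts.modify name PySem.Dict.empty (fun inner => inner.insert "stop" stop)
      bouts)
    bouts
  bouts.items.map (fun p => (p.1, p.2.items))

-- ===== PORT B =====
-- loop body of Source B's single pass (state: per-label start lists, per-label stop lists, prev value)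
def pvStepB (n : Int) (st : List (List Int) × List (List Int) × Int) (iv : Int × Int) :
    List (List Int) × List (List Int) × Int :=
  if iv.2 ≠ st.2.2 then
    let stops := if 1 ≤ st.2.2 ∧ st.2.2 ≤ n then
        PySem.List.pySetD st.2.1 (st.2.2 - 1) (PySem.List.pyGetD st.2.1 (st.2.2 - 1) [] ++ [iv.1])
      else st.2.1
    let starts := if 1 ≤ iv.2 ∧ iv.2 ≤ n then
        PySem.List.pySetD st.1 (iv.2 - 1) (PySem.List.pyGetD st.1 (iv.2 - 1) [] ++ [iv.1 + 1])
      else st.1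
    (starts, stops, iv.2)
  else st

def rast_to_bouts_alt (oneHot : List Int) (names : List String) :
    List (String × List (String × List Int)) :=
  let n : Int := names.length
  let st := (PySem.List.enumerate oneHot).foldl (pvStepB n)
    (names.map (fun _ => ([] : List Int)), names.map (fun _ => ([] : List Int)), (0 : Int))
  let stops := if 1 ≤ st.2.2 ∧ st.2.2 ≤ n then
      PySem.List.pySetD st.2.1 (st.2.2 - 1)
        (PySem.List.pyGetD st.2.1 (st.2.2 - 1) [] ++ [(oneHot.length : Int)])
    else st.2.1
  let d : PySem.Dict String (PySem.Dict String (List Int)) :=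
    (PySem.List.enumerate names).foldl
      (fun d vn => d.insert vn.2 (PySem.Dict.ofList
        [("start", PySem.List.pyGetD st.1 vn.1 []), ("stop", PySem.List.pyGetD stops vn.1 [])]))
      PySem.Dict.empty
  d.items.map (fun p => (p.1, p.2.items))

-- ===== PRECONDITION & SPEC =====
def Spec_rast_to_bouts (oneHot : List Int) (names : List String) (out : List (String × List (String × List Int))) : Prop := out = rast_to_bouts_alt oneHot names
instance (oneHot : List Int) (names : List String) (out : List (String × List (String × List Int))) : Decidable (Spec_rast_to_bouts oneHot names out) := by unfold Spec_rast_to_bouts; infer_instance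

-- ===== CLAIM (what is proved, stated in full; the proofs are below) =====
def Claim_equal_rast_to_bouts : Prop := ∀ (oneHot : List Int) (names : List String), Dom_rast_to_bouts oneHot names → Spec_rast_to_bouts oneHot names (rast_to_bouts oneHot names)

-- ===== LEMMAS AND PROOFS =====

-- start indices of runs of value w in xs, given the flag p = "previous frame had value w" and
-- i = number of frames before xs; stop indices likewise, WITHOUT the final stop of a run
-- still open at the end of xs.
def pvSpecS (w : Int) (p : Bool) (i : Int) : List Int → List Int
  | [] => []
  | x :: xs => if (x == w) && !p then (i + 1) :: pvSpecS w (x == w) (i + 1) xs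
               else pvSpecS w (x == w) (i + 1) xs

def pvSpecT (w : Int) (p : Bool) (i : Int) : List Int → List Int
  | [] => []
  | x :: xs => if p && !(x == w) then i :: pvSpecT w (x == w) (i + 1) xs
               else pvSpecT w (x == w) (i + 1) xs

-- the per-name value both programs store, in spec form
def pvGOut (oneHot : List Int) (w : Int) : PySem.Dict String (List Int) :=
  PySem.Dict.ofList
    [("start", pvSpecS w false 0 oneHot),
     ("stop", pvSpecT w false 0 oneHot ++
        (if (oneHot.map (fun x => x == w)).getLastD false then [(oneHot.length : Int)] else []))]

-- ---- A-side: the two zip comprehensions compute pvSpecS / pvSpecT ----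

lemma pvA_start (w : Int) : ∀ (xs : List Int) (p : Bool) (i : Int),
    (PySem.List.enumerate ((xs.map (fun x => x == w) ++ [false]).zip
        (p :: xs.map (fun x => x == w))) i).filterMap
      (fun q => if q.2.1 && !q.2.2 then some (q.1 + 1) else none)
    = pvSpecS w p i xs := by
  intro xs
  induction xs with
  | nil =>
    intro p i
    simp [PySem.List.enumerate_cons, PySem.List.enumerate_nil, pvSpecS]
  | cons x xs ih =>
    intro p i
    simp only [List.map_cons, List.cons_append, List.zip_cons_cons, PySem.List.enumerate_cons,
      List.filterMap_cons, pvSpecS]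
    rw [ih (x == w) (i + 1)]
    by_cases h : ((x == w) && !p) = true
    · simp [h]
    · simp only [Bool.not_eq_true] at h
      simp [h]

lemma pvA_stop (w : Int) : ∀ (xs : List Int) (p : Bool) (i : Int),
    (PySem.List.enumerate ((p :: xs.map (fun x => x == w)).zip
        (xs.map (fun x => x == w) ++ [false])) i).filterMap
      (fun q => if q.2.1 && !q.2.2 then some q.1 else none)
    = pvSpecT w p i xs ++
      (if (xs.map (fun x => x == w)).getLastD p then [i + (xs.length : Int)] else []) := by
  intro xs
  induction xs with
  | nil =>
    intro p i
    cases p <;>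
      simp [PySem.List.enumerate_cons, PySem.List.enumerate_nil, pvSpecT]
  | cons x xs ih =>
    intro p i
    simp only [List.map_cons, List.cons_append, List.zip_cons_cons, PySem.List.enumerate_cons,
      List.filterMap_cons, pvSpecT, List.getLastD_cons, List.length_cons]
    rw [ih (x == w) (i + 1)]
    have harith : (i + 1) + (xs.length : Int) = i + ((xs.length : Nat) + 1 : Nat) := by
      push_cast; ring
    rw [harith]
    by_cases h : (p && !(x == w)) = true
    · simp [h]
    · simp only [Bool.not_eq_true] at h
      simp [h]

-- A's loop body is an insert of pvGOut
lemma pvA_body (oneHot : List Int) (bouts : PySem.Dict String (PySem.Dict String (List Int)))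
    (val : Int) (name : String) :
    (let bouts := bouts.insert name
        (PySem.Dict.ofList [("start", ([] : List Int)), ("stop", ([] : List Int))])
     let rast : List Bool := oneHot.map (fun annot => annot == val + 1)
     let rast := [false] ++ rast ++ [false]
     let start := (PySem.List.enumerate ((PySem.List.slice rast (some 1) none).zip
         (PySem.List.slice rast none (some (-1))))).filterMap
       (fun p => if p.2.1 && !p.2.2 then some (p.1 + 1) else none)
     let stop := (PySem.List.enumerate ((PySem.List.slice rast none (some (-1))).zip
         (PySem.List.slice rast (some 1) none))).filterMap
       (fun p => if p.2.1 && !p.2.2 then some p.1 else none)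
     let bouts := bouts.modify name PySem.Dict.empty (fun inner => inner.insert "start" start)
     let bouts := bouts.modify name PySem.Dict.empty (fun inner => inner.insert "stop" stop)
     bouts)
    = bouts.insert name (pvGOut oneHot (val + 1)) := by
  have h1 : PySem.List.slice ([false] ++ oneHot.map (fun annot => annot == val + 1) ++ [false])
      (some 1) none = oneHot.map (fun annot => annot == val + 1) ++ [false] := by
    rw [PySem.List.slice_from_one]; rfl
  have h2 : PySem.List.slice ([false] ++ oneHot.map (fun annot => annot == val + 1) ++ [false])
      none (some (-1)) = false :: oneHot.map (fun annot => annot == val + 1) := by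
    rw [PySem.List.slice_to_neg_one,
      show ([false] ++ oneHot.map (fun annot => annot == val + 1) ++ [false])
        = (false :: oneHot.map (fun annot => annot == val + 1)) ++ [false] by simp]
    exact List.dropLast_concat
  simp only [PySem.Dict.modify, PySem.Dict.getD_insert_self, PySem.Dict.insert_insert_self,
    h1, h2]
  rw [pvA_start (val + 1) oneHot false 0, pvA_stop (val + 1) oneHot false 0]
  congr 1
  rw [pvGOut]
  simp only [zero_add]
  rfl

-- ---- B-side: the single pass accumulates pvSpecS / pvSpecT per label ----

lemma pvGS_eq (l : List (List Int)) (a : Int) (val : Nat) (v : List Int)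
    (ha : a = (val : Int)) (h : val < l.length) :
    PySem.List.pyGetD (PySem.List.pySetD l a v) (val : Int) [] = v := by
  subst ha
  rw [PySem.List.pySetD_natCast, PySem.List.pyGetD_natCast]
  simp [List.getD, h]

lemma pvGS_ne (l : List (List Int)) (a : Int) (val : Nat) (v : List Int)
    (h0 : 0 ≤ a) (h : a ≠ (val : Int)) :
    PySem.List.pyGetD (PySem.List.pySetD l a v) (val : Int) []
      = PySem.List.pyGetD l (val : Int) [] := by
  have ha' : a = ((a.toNat : Nat) : Int) := by omega
  rw [ha', PySem.List.pySetD_natCast, PySem.List.pyGetD_natCast, PySem.List.pyGetD_natCast]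
  have hne : a.toNat ≠ val := by omega
  simp [List.getD, List.getElem?_set_ne hne]

lemma pvB_inv (n : Int) : ∀ (xs : List Int) (starts stops : List (List Int)) (prev i : Int),
    (((PySem.List.enumerate xs i).foldl (pvStepB n) (starts, stops, prev)).2.2
        = xs.getLastD prev)
    ∧ (((PySem.List.enumerate xs i).foldl (pvStepB n) (starts, stops, prev)).1.length
        = starts.length)
    ∧ (((PySem.List.enumerate xs i).foldl (pvStepB n) (starts, stops, prev)).2.1.length
        = stops.length)
    ∧ (∀ (val : Nat), (val : Int) < n → starts.length = n.toNat → stops.length = n.toNat →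
        PySem.List.pyGetD ((PySem.List.enumerate xs i).foldl (pvStepB n) (starts, stops, prev)).1 (val : Int) []
          = PySem.List.pyGetD starts (val : Int) []
            ++ pvSpecS ((val : Int) + 1) (prev == (val : Int) + 1) i xs
        ∧ PySem.List.pyGetD ((PySem.List.enumerate xs i).foldl (pvStepB n) (starts, stops, prev)).2.1 (val : Int) []
          = PySem.List.pyGetD stops (val : Int) []
            ++ pvSpecT ((val : Int) + 1) (prev == (val : Int) + 1) i xs) := by
  intro xs
  induction xs with
  | nil =>
    intro starts stops prev i
    refine ⟨rfl, rfl, rfl, ?_⟩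
    intro val _ _ _
    simp [PySem.List.enumerate_nil, pvSpecS, pvSpecT]
  | cons x xs ih =>
    intro starts stops prev i
    rw [PySem.List.enumerate_cons]
    simp only [List.foldl_cons]
    by_cases hx : x = prev
    · have hstep : pvStepB n (starts, stops, prev) (i, x) = (starts, stops, prev) := by
        simp [pvStepB, hx]
      rw [hstep]
      obtain ⟨h1, h2, h3, h4⟩ := ih starts stops prev (i + 1)
      refine ⟨?_, h2, h3, ?_⟩
      · rw [h1, List.getLastD_cons, hx]
      · intro val hv hs ht
        obtain ⟨ha, hb⟩ := h4 val hv hs ht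
        subst hx
        constructor
        · rw [ha]; congr 1; simp [pvSpecS]
        · rw [hb]; congr 1; simp [pvSpecT]
    · set S' := (if 1 ≤ x ∧ x ≤ n then
          PySem.List.pySetD starts (x - 1) (PySem.List.pyGetD starts (x - 1) [] ++ [i + 1])
        else starts) with hS'
      set T' := (if 1 ≤ prev ∧ prev ≤ n then
          PySem.List.pySetD stops (prev - 1) (PySem.List.pyGetD stops (prev - 1) [] ++ [i])
        else stops) with hT'
      have hstep : pvStepB n (starts, stops, prev) (i, x) = (S', T', x) := by
        simp only [pvStepB]
        rw [if_pos hx]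
      rw [hstep]
      have hSlen : S'.length = starts.length := by
        rw [hS']; split_ifs <;> simp [PySem.List.length_pySetD]
      have hTlen : T'.length = stops.length := by
        rw [hT']; split_ifs <;> simp [PySem.List.length_pySetD]
      obtain ⟨h1, h2, h3, h4⟩ := ih S' T' x (i + 1)
      refine ⟨?_, by rw [h2, hSlen], by rw [h3, hTlen], ?_⟩
      · rw [h1, List.getLastD_cons]
      · intro val hv hs ht
        obtain ⟨ha, hb⟩ := h4 val hv (by rw [hSlen]; exact hs) (by rw [hTlen]; exact ht)
        constructor
        · -- starts component
          rw [ha]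
          by_cases hxw : x = (val : Int) + 1
          · have hpw : (prev == (val : Int) + 1) = false := by
              rw [beq_eq_false_iff_ne]; intro hc; exact hx (by omega)
            have hxwb : (x == (val : Int) + 1) = true := by rw [beq_iff_eq]; exact hxw
            have hg : 1 ≤ x ∧ x ≤ n := by omega
            have hidx : pvSpecS ((val : Int) + 1) (prev == (val : Int) + 1) i (x :: xs)
                = (i + 1) :: pvSpecS ((val : Int) + 1) (x == (val : Int) + 1) (i + 1) xs := by
              rw [pvSpecS]
              simp [hxwb, hpw]
            rw [hidx, hS', if_pos hg,
              pvGS_eq starts (x - 1) val _ (by omega) (by omega),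
              show x - 1 = (val : Int) by omega]
            simp
          · have hxwb : (x == (val : Int) + 1) = false := by
              rw [beq_eq_false_iff_ne]; exact hxw
            have hspec : pvSpecS ((val : Int) + 1) (prev == (val : Int) + 1) i (x :: xs)
                = pvSpecS ((val : Int) + 1) (x == (val : Int) + 1) (i + 1) xs := by
              rw [pvSpecS]; simp [hxwb]
            rw [hspec]
            congr 1
            rw [hS']
            split_ifs with hg
            · exact pvGS_ne starts (x - 1) val _ (by omega) (by omega)
            · rfl
        · -- stops component
          rw [hb]
          by_cases hpw : prev = (val : Int) + 1
          · have hpwb : (prev == (val : Int) + 1) = true := by rw [beq_iff_eq]; exact hpw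
            have hxwb : (x == (val : Int) + 1) = false := by
              rw [beq_eq_false_iff_ne]; intro hc; exact hx (by omega)
            have hg : 1 ≤ prev ∧ prev ≤ n := by omega
            have hidx : pvSpecT ((val : Int) + 1) (prev == (val : Int) + 1) i (x :: xs)
                = i :: pvSpecT ((val : Int) + 1) (x == (val : Int) + 1) (i + 1) xs := by
              rw [pvSpecT]; simp [hxwb, hpwb]
            rw [hidx, hT', if_pos hg,
              pvGS_eq stops (prev - 1) val _ (by omega) (by omega),
              show prev - 1 = (val : Int) by omega]
            simp
          · have hpwb : (prev == (val : Int) + 1) = false := by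
              rw [beq_eq_false_iff_ne]; exact hpw
            have hspec : pvSpecT ((val : Int) + 1) (prev == (val : Int) + 1) i (x :: xs)
                = pvSpecT ((val : Int) + 1) (x == (val : Int) + 1) (i + 1) xs := by
              rw [pvSpecT]; simp [hpwb]
            rw [hspec]
            congr 1
            rw [hT']
            split_ifs with hg
            · exact pvGS_ne stops (prev - 1) val _ (by omega) (by omega)
            · rfl

lemma pvMapLast (w : Int) : ∀ (xs : List Int) (d : Int),
    (xs.map (fun x => x == w)).getLastD (d == w) = (xs.getLastD d == w) := by
  intro xs
  induction xs with
  | nil => intro d; rfl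
  | cons x xs ih => intro d; simp only [List.map_cons, List.getLastD_cons]; exact ih x

lemma pvInit (names : List String) (val : Nat) :
    PySem.List.pyGetD (names.map (fun _ => ([] : List Int))) (val : Int) [] = [] := by
  rw [PySem.List.pyGetD_natCast]
  simp only [List.getD_eq_getElem?_getD, List.getElem?_map]
  cases names[val]? <;> simp

-- the final per-label lists of B's pass are exactly pvGOut
lemma pvB_final (oneHot : List Int) (names : List String) (val : Nat) (h : val < names.length) :
    (let n : Int := names.length
     let st := (PySem.List.enumerate oneHot).foldl (pvStepB n)
       (names.map (fun _ => ([] : List Int)), names.map (fun _ => ([] : List Int)), (0 : Int))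
     let stops := if 1 ≤ st.2.2 ∧ st.2.2 ≤ n then
         PySem.List.pySetD st.2.1 (st.2.2 - 1)
           (PySem.List.pyGetD st.2.1 (st.2.2 - 1) [] ++ [(oneHot.length : Int)])
       else st.2.1
     PySem.Dict.ofList [("start", PySem.List.pyGetD st.1 (val : Int) []),
                        ("stop", PySem.List.pyGetD stops (val : Int) [])])
    = pvGOut oneHot ((val : Int) + 1) := by
  obtain ⟨h1, h2, h3, h4⟩ := pvB_inv (names.length : Int) oneHot
    (names.map (fun _ => ([] : List Int))) (names.map (fun _ => ([] : List Int))) 0 0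
  have hlen : (names.map (fun _ => ([] : List Int))).length = ((names.length : Int)).toNat := by
    simp
  obtain ⟨hA, hB⟩ := h4 val (by exact_mod_cast h) hlen hlen
  have h00 : ((0 : Int) == (val : Int) + 1) = false := by
    rw [beq_eq_false_iff_ne]; omega
  have hml : (oneHot.map (fun x => x == (val : Int) + 1)).getLastD false
      = (oneHot.getLastD 0 == (val : Int) + 1) := by
    rw [← h00, pvMapLast]
  have hstart : PySem.List.pyGetD
      ((PySem.List.enumerate oneHot).foldl (pvStepB (names.length : Int))
        (names.map (fun _ => ([] : List Int)), names.map (fun _ => ([] : List Int)), (0 : Int))).1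
      (val : Int) [] = pvSpecS ((val : Int) + 1) false 0 oneHot := by
    rw [hA, pvInit, h00]; simp
  have hstop0 : PySem.List.pyGetD
      ((PySem.List.enumerate oneHot).foldl (pvStepB (names.length : Int))
        (names.map (fun _ => ([] : List Int)), names.map (fun _ => ([] : List Int)), (0 : Int))).2.1
      (val : Int) [] = pvSpecT ((val : Int) + 1) false 0 oneHot := by
    rw [hB, pvInit, h00]; simp
  simp only []
  rw [hstart]
  by_cases hp : oneHot.getLastD 0 = (val : Int) + 1
  · have hg : 1 ≤ ((PySem.List.enumerate oneHot).foldl (pvStepB (names.length : Int))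
        (names.map (fun _ => ([] : List Int)), names.map (fun _ => ([] : List Int)), (0 : Int))).2.2
        ∧ ((PySem.List.enumerate oneHot).foldl (pvStepB (names.length : Int))
        (names.map (fun _ => ([] : List Int)), names.map (fun _ => ([] : List Int)), (0 : Int))).2.2
          ≤ (names.length : Int) := by
      rw [h1, hp]; omega
    rw [if_pos hg]
    rw [pvGS_eq _ _ val _ (by rw [h1, hp]; ring) (by rw [h3]; simpa using h)]
    rw [show ((PySem.List.enumerate oneHot).foldl (pvStepB (names.length : Int))
        (names.map (fun _ => ([] : List Int)), names.map (fun _ => ([] : List Int)), (0 : Int))).2.2 - 1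
        = (val : Int) by rw [h1, hp]; ring]
    rw [hstop0, pvGOut, hml]
    have : (oneHot.getLastD 0 == (val : Int) + 1) = true := by rw [beq_iff_eq]; exact hp
    rw [this]
    simp
  · have hmlf : (oneHot.getLastD 0 == (val : Int) + 1) = false := by
      rw [beq_eq_false_iff_ne]; exact hp
    rw [pvGOut, hml, hmlf]
    simp only [if_neg Bool.false_ne_true, List.append_nil]
    split_ifs with hg
    · rw [pvGS_ne _ _ val _ (by omega) (by rw [h1]; omega)]
      rw [hstop0]
    · rw [hstop0]

-- ---- dict bookkeeping ----

def pvFromkeys {V : Type} (e : V) (l : List String) : PySem.Dict String V :=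
  l.foldl (fun d k => d.insert k e) PySem.Dict.empty

lemma pvFK_val {V : Type} (e : V) : ∀ (l : List String) (d : PySem.Dict String V),
    (∀ p ∈ d.items, p.2 = e) →
    ∀ p ∈ (l.foldl (fun d k => d.insert k e) d).items, p.2 = e := by
  intro l
  induction l with
  | nil => intro d h; simpa using h
  | cons k l ih =>
    intro d h
    simp only [List.foldl_cons]
    refine ih _ ?_
    intro p hp
    rcases (PySem.Dict.mem_items_insert _ _ _ p).1 hp with h1 | h2
    · rw [h1]
    · exact h p h2.1

lemma pvFK_contains {V : Type} (e : V) (l : List String) (k : String) :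
    (pvFromkeys e l).contains k = true ↔ k ∈ l := by
  rw [pvFromkeys, PySem.Dict.contains_iff_mem_keys,
    PySem.Dict.keys_foldl_insert l (fun _ _ => e) PySem.Dict.empty,
    PySem.Dict.keys_empty, PySem.Set.update_nil_left, PySem.Set.mem_ofList]

lemma pvFK_insert_mem {V : Type} (e : V) (l : List String) (k : String) (hk : k ∈ l) :
    (pvFromkeys e l).insert k e = pvFromkeys e l := by
  have hc : (pvFromkeys e l).contains k = true := (pvFK_contains e l k).2 hk
  apply PySem.Dict.ext
  rw [PySem.Dict.items_insert_of_contains _ _ hc]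
  have : ∀ p ∈ (pvFromkeys e l).items,
      (fun p : String × V => if p.1 == k then (k, e) else p) p = id p := by
    intro p hp
    by_cases hpk : (p.1 == k) = true
    · have hv : p.2 = e := pvFK_val e l PySem.Dict.empty
        (by intro p hp; simp [PySem.Dict.empty] at hp) p hp
      obtain ⟨p1, p2⟩ := p
      simp only [hpk, if_pos]
      simp only at hpk hv
      rw [eq_of_beq hpk] at *
      simp [hv]
    · simp only [Bool.not_eq_true] at hpk
      simp [hpk]
  rw [List.map_congr_left this, List.map_id]

lemma pvFK_snoc {V : Type} (e : V) (t : List String) (k : String) :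
    pvFromkeys e (t ++ [k]) = (pvFromkeys e t).insert k e := by
  rw [pvFromkeys, List.foldl_append]
  rfl

lemma pvEnum_append {α : Type} (xs ys : List α) : ∀ (s : Int),
    PySem.List.enumerate (xs ++ ys) s
      = PySem.List.enumerate xs s ++ PySem.List.enumerate ys (s + (xs.length : Int)) := by
  induction xs with
  | nil => intro s; simp [PySem.List.enumerate_nil]
  | cons x xs ih =>
    intro s
    simp only [List.cons_append, PySem.List.enumerate_cons, ih (s + 1), List.length_cons]
    congr 2
    push_cast
    ring

lemma pvMem_enum {α : Type} : ∀ (l : List α) (s : Int) (q : Int × α),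
    q ∈ PySem.List.enumerate l s → (s ≤ q.1 ∧ q.1 < s + (l.length : Int)) ∧ q.2 ∈ l := by
  intro l
  induction l with
  | nil => intro s q hq; simp [PySem.List.enumerate_nil] at hq
  | cons x xs ih =>
    intro s q hq
    rw [PySem.List.enumerate_cons] at hq
    rcases List.mem_cons.1 hq with h | h
    · subst h; simp
    · obtain ⟨hb, hm⟩ := ih (s + 1) q h
      refine ⟨?_, List.mem_cons_of_mem _ hm⟩
      simp only [List.length_cons]
      push_cast
      omega

lemma pvTrail {V : Type} (g : Int → V) (k : String) (w : V) :
    ∀ (l : List (Int × String)) (D : PySem.Dict String V),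
    (∀ q ∈ l, D.contains q.2 = true) → (∀ q ∈ l, q.2 ≠ k) →
    l.foldl (fun d vn => d.insert vn.2 (g vn.1)) (PySem.Dict.mk (D.items ++ [(k, w)]))
    = PySem.Dict.mk ((l.foldl (fun d vn => d.insert vn.2 (g vn.1)) D).items ++ [(k, w)]) := by
  intro l
  induction l with
  | nil => intro D _ _; rfl
  | cons q l ih =>
    intro D hc hk
    simp only [List.foldl_cons]
    have hcq : D.contains q.2 = true := hc q (List.mem_cons_self)
    have hkq : q.2 ≠ k := hk q (List.mem_cons_self)
    have hkb : (k == q.2) = false := by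
      rw [beq_eq_false_iff_ne]; exact fun hc' => hkq hc'.symm
    have hcontains' : (PySem.Dict.mk (D.items ++ [(k, w)])).contains q.2 = true := by
      rw [PySem.Dict.contains_mk, List.any_append]
      rw [PySem.Dict.contains] at hcq
      simp [hcq]
    have hins : (PySem.Dict.mk (D.items ++ [(k, w)])).insert q.2 (g q.1)
        = PySem.Dict.mk ((D.insert q.2 (g q.1)).items ++ [(k, w)]) := by
      apply PySem.Dict.ext
      rw [PySem.Dict.items_insert_of_contains _ _ hcontains',
        PySem.Dict.items_insert_of_contains _ _ hcq]
      show List.map _ (D.items ++ [(k, w)]) = _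
      rw [List.map_append]
      congr 1
      have hcond : ¬(((k, w) : String × V).1 == q.2) = true := by simp [hkb]
      simp only [List.map_cons, List.map_nil, if_neg hcond]
    rw [hins]
    refine ih (D.insert q.2 (g q.1)) ?_ ?_
    · intro r hr
      rw [PySem.Dict.contains_insert]
      rw [hc r (List.mem_cons_of_mem _ hr)]
      simp
    · intro r hr
      exact hk r (List.mem_cons_of_mem _ hr)

lemma pvFold_keys {V : Type} (g : Int → V) (names : List String) (k : String)
    (h : ((PySem.List.enumerate names).foldl (fun d vn => d.insert vn.2 (g vn.1))
        PySem.Dict.empty).contains k = true) : k ∈ names := by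
  rw [PySem.Dict.contains_iff_mem_keys,
    PySem.Dict.keys_foldl_insert_key (PySem.List.enumerate names) (fun vn => vn.2)
      (fun _ vn => g vn.1) PySem.Dict.empty,
    PySem.Dict.keys_empty, PySem.List.map_snd_enumerate, PySem.Set.update_nil_left,
    PySem.Set.mem_ofList] at h
  exact h

-- prepopulating the dict with every key it will be given (dict.fromkeys) does not change
-- the result of the insertion loop
lemma pvDict_fromkeys_fold {V : Type} (g : Int → V) (e : V) (names : List String) :
    (PySem.List.enumerate names).foldl (fun d vn => d.insert vn.2 (g vn.1))
      (names.foldl (fun d name => d.insert name e) PySem.Dict.empty)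
    = (PySem.List.enumerate names).foldl (fun d vn => d.insert vn.2 (g vn.1))
        PySem.Dict.empty := by
  show (PySem.List.enumerate names).foldl (fun d vn => d.insert vn.2 (g vn.1)) (pvFromkeys e names) = _
  induction names using List.reverseRecOn with
  | nil => rfl
  | append_singleton t k ih =>
    rw [show PySem.List.enumerate (t ++ [k]) (0 : Int)
        = PySem.List.enumerate t 0 ++ [((t.length : Int), k)] by
      rw [pvEnum_append t [k] 0, PySem.List.enumerate_cons, PySem.List.enumerate_nil]; simp]
    rw [List.foldl_append, List.foldl_append]
    simp only [List.foldl_cons, List.foldl_nil]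
    rw [pvFK_snoc]
    by_cases hk : k ∈ t
    · rw [pvFK_insert_mem e t k hk, ih]
    · have hfold := pvTrail g k e (PySem.List.enumerate t 0) (pvFromkeys e t)
        (fun q hq => (pvFK_contains e t q.2).2 (pvMem_enum t 0 q hq).2)
        (fun q hq => fun hqe => hk (hqe ▸ (pvMem_enum t 0 q hq).2))
      have hform : (pvFromkeys e t).insert k e
          = PySem.Dict.mk ((pvFromkeys e t).items ++ [(k, e)]) := by
        apply PySem.Dict.ext
        have hcf : (pvFromkeys e t).contains k = false := by
          cases hcb : (pvFromkeys e t).contains k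
          · rfl
          · exact absurd ((pvFK_contains e t k).1 hcb) hk
        rw [PySem.Dict.items_insert_of_not_contains _ _ hcf]
      rw [hform, hfold, ih]
      -- final insert at k on both sides
      have hDc : ((PySem.List.enumerate t 0).foldl (fun d vn => d.insert vn.2 (g vn.1))
          PySem.Dict.empty).contains k = false := by
        cases hcb : ((PySem.List.enumerate t 0).foldl (fun d vn => d.insert vn.2 (g vn.1))
            PySem.Dict.empty).contains k
        · rfl
        · exact absurd (pvFold_keys g t k hcb) hk
      set D := (PySem.List.enumerate t 0).foldl (fun d vn => d.insert vn.2 (g vn.1))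
        PySem.Dict.empty with hD
      have hcm : (PySem.Dict.mk (D.items ++ [(k, e)])).contains k = true := by
        rw [PySem.Dict.contains_mk, List.any_append]
        simp
      apply PySem.Dict.ext
      rw [PySem.Dict.items_insert_of_contains _ _ hcm,
        PySem.Dict.items_insert_of_not_contains _ _ hDc]
      show List.map _ (D.items ++ [(k, e)]) = _
      rw [List.map_append]
      congr 1
      · have hmap : ∀ p ∈ D.items,
            (fun p : String × V => if p.1 == k then (k, g ((t.length : Nat) : Int)) else p) p
              = id p := by
          intro p hp
          have hpt : p.1 ∈ t := pvFold_keys g t p.1 (by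
            rw [PySem.Dict.contains_iff_mem_keys]
            exact PySem.Dict.mem_keys_of_mem_items _ hp)
          have hpk : (p.1 == k) = false := by
            rw [beq_eq_false_iff_ne]; intro hpe; exact hk (hpe ▸ hpt)
          simp [hpk]
        rw [List.map_congr_left hmap, List.map_id]
      · simp

-- ===== VERDICT (by name: the statement is the Claim_ definition above) =====
theorem rast_to_bouts_spec : Claim_equal_rast_to_bouts := by
  intro oneHot names _
  show rast_to_bouts oneHot names = rast_to_bouts_alt oneHot names
  unfold rast_to_bouts rast_to_bouts_alt
  simp only []
  congr 1
  rw [PySem.List.foldl_congr_mem (PySem.List.enumerate names) _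
    (fun d vn => d.insert vn.2 (pvGOut oneHot (vn.1 + 1))) _
    (fun acc q _ => pvA_body oneHot acc q.1 q.2)]
  rw [pvDict_fromkeys_fold (fun v => pvGOut oneHot (v + 1)) PySem.Dict.empty names]
  congr 1
  symm
  apply PySem.List.foldl_congr_mem
  intro acc q hq
  obtain ⟨⟨hq0, hq1⟩, _⟩ := pvMem_enum names 0 q hq
  obtain ⟨v, hv⟩ : ∃ v : Nat, q.1 = (v : Int) := ⟨q.1.toNat, by omega⟩
  rw [hv]
  congr 1
  exact pvB_final oneHot names v (by omega)
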